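-- pv_equiv track=rewrite | github.com/Bobcatsoap/jy-server | cell/RoomType6Calculator.py | is_f_j
-- ===== SOURCE A (Python) =====
-- import copy
--
-- def is_f_j(cards):
--     # 飞机长度必须是5的倍数，并且大于等于10
--     if len(cards) < 10:
--         return False
--     if len(cards) % 5 != 0:
--         return False
--     new_cards = copy.deepcopy(cards)
--     three = []
--     # 找到所有的三张
--     for card in new_cards:
--         if new_cards.count(card) == 3 and card not in three:
--             # 有 2 以上的不行
--             if card >= 15:
--                 return False
--             three.append(card)
--     # 没有飞机
--     if len(three) == 0:
--         return False
--     three.sort()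
--     # 判断三张是否相连
--     for i in range(0, len(three) - 1):
--         if three[i] + 1 != three[i + 1]:
--             return False
--     # 移除所有三张
--     for card in three:
--         # 移除
--         while card in new_cards:
--             new_cards.remove(card)
--
--     # 排序
--     new_cards.sort()
--     # 检查剩下的是否能组成翅膀
--     can_wing = True
--     for index in range(0, len(new_cards), 2):
--         if new_cards[index] != new_cards[index + 1]:
--             can_wing = False
--             break
--     return can_wing
-- ===== SOURCE B (Python) =====
-- def is_f_j(cards):
--     n = len(cards)
--     if n < 10 or n % 5:
--         return False
--     cnt = {}
--     for c in cards:
--         cnt[c] = cnt.get(c, 0) + 1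
--     triples = sorted(v for v, k in cnt.items() if k == 3)
--     if not triples:
--         return False
--     if triples[-1] >= 15:
--         return False
--     if any(b - a != 1 for a, b in zip(triples, triples[1:])):
--         return False
--     return all(k % 2 == 0 for k in cnt.values() if k != 3)
-- ===== Notes on version B (the rewrite author's own statement) =====
-- stated objective: faster
-- what changed: Replace A's quadratic scan (list.count inside the loop, repeated remove passes, pairwise index walk) by a single counting pass over a dict plus a sort of the distinct triple values, checking wing feasibility as 'every non-triple count is even'.
import Mathlib
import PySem

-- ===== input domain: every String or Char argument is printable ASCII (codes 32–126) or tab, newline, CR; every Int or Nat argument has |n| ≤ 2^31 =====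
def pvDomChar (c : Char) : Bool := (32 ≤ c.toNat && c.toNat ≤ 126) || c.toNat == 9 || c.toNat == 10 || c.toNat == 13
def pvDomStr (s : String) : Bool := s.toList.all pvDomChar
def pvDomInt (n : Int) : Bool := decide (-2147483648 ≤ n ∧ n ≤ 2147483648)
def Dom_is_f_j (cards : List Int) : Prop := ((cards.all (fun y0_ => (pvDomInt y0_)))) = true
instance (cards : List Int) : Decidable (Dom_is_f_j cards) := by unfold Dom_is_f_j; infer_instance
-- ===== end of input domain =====

-- B replaces A's quadratic count-inside-loop scan and remove loops by one counting pass
-- over a dict (Counter) plus a sort of the distinct triple values; return value only (A does not mutate its argument).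

-- ===== PORT A =====
-- 'for card in new_cards: if new_cards.count(card)==3 and card not in three: …' with early 'return False' on card >= 15
def pvA_buildThree (all : List Int) : List Int → List Int → Option (List Int)
  | three, [] => some three
  | three, c :: rest =>
    if all.count c = 3 ∧ c ∉ three then
      if 15 ≤ c then none
      else pvA_buildThree all (three ++ [c]) rest
    else pvA_buildThree all three rest

-- 'for i in range(0, len(three)-1): if three[i]+1 != three[i+1]: return False'
def pvA_consec (t : List Int) : Bool :=
  (PySem.List.pyRange 0 ((t.length : Int) - 1) 1).all
    (fun i => PySem.List.pyGetD t i 0 + 1 == PySem.List.pyGetD t (i + 1) 0)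

-- 'while card in new_cards: new_cards.remove(card)' — removes every occurrence, keeping the order of the rest (exact)
def pvA_removeAll (c : Int) : List Int → List Int
  | [] => []
  | x :: xs => if x = c then pvA_removeAll c xs else x :: pvA_removeAll c xs

-- 'for index in range(0, len(new_cards), 2): if new_cards[index] != new_cards[index+1]: …'
-- on an odd-length list Python raises IndexError at the final lone element: that input is outside Pre_; here the port returns false
def pvA_wing : List Int → Bool
  | [] => true
  | [_] => false
  | a :: b :: rest => if a = b then pvA_wing rest else false

def is_f_j (cards : List Int) : Bool :=
  if cards.length < 10 then false
  else if cards.length % 5 ≠ 0 then false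
  else
    match pvA_buildThree cards [] cards with
    | none => false
    | some three =>
      if three = [] then false
      else
        let threeS := PySem.List.sorted three (fun v => v)
        if ¬ pvA_consec threeS = true then false
        else
          let new2 := threeS.foldl (fun acc c => pvA_removeAll c acc) cards
          pvA_wing (PySem.List.sorted new2 (fun v => v))

-- ===== PORT B =====
def is_f_j_alt (cards : List Int) : Bool :=
  let n := cards.length
  if n < 10 ∨ n % 5 ≠ 0 then false
  else
    let cnt := cards.foldl (fun d c => d.insert c (d.getD c 0 + 1)) (PySem.Dict.empty : PySem.Dict Int Int)
    let triples : List Int := PySem.List.sorted ((cnt.items.filter (fun p => p.2 == 3)).map (fun p => p.1)) (fun v => v)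
    if triples = [] then false
    else if 15 ≤ PySem.List.pyGetD triples (-1) 0 then false
    else if (triples.zip triples.tail).any (fun p => !(p.2 - p.1 == 1)) then false
    else (cnt.values.filter (fun k => !(k == 3))).all (fun k => PySem.Int.mod k 2 == 0)

-- ===== PRECONDITION & SPEC =====
-- Pre_ excludes exactly the inputs on which Python's A raises IndexError (new_cards[index+1] past the
-- end of the sorted wing list): a consecutive run of triples below 15 whose leftover cards pair up
-- except for an odd count at the largest leftover value.  On those inputs B returns False (an odd
-- count can never pair into wings); everywhere else A returns normally and Pre_ holds.  The two PORTS
-- happen to agree even on the excluded inputs (the A-port returns false at the lone last element where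
-- Python raises), so the equality proof below does not need the Pre_ hypothesis; Pre_'s role is the
-- Python-level IndexError.
def Pre_is_f_j (cards : List Int) : Prop :=
  ¬ (10 ≤ cards.length ∧ cards.length % 5 = 0 ∧
     (∃ v ∈ cards, cards.count v = 3) ∧
     (∀ v ∈ cards, cards.count v = 3 → v < 15) ∧
     (let t := PySem.List.sorted ((PySem.List.dedup cards).filter (fun v => cards.count v == 3)) (fun v => v)
      ((t.zip t.tail).all (fun p => p.1 + 1 == p.2)) = true) ∧
     (let R := cards.filter (fun x => !(cards.count x == 3))
      R ≠ [] ∧ R.count ((R.max?).getD 0) % 2 = 1 ∧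
      ∀ v ∈ R, v ≠ (R.max?).getD 0 → R.count v % 2 = 0))
instance (cards : List Int) : Decidable (Pre_is_f_j cards) := by unfold Pre_is_f_j; infer_instance

def pvWitness_is_f_j : List Int := [3, 3, 3, 4, 4, 4, 5, 5, 6, 6]

def Spec_is_f_j (cards : List Int) (out : Bool) : Prop := out = is_f_j_alt cards
instance (cards : List Int) (out : Bool) : Decidable (Spec_is_f_j cards out) := by unfold Spec_is_f_j; infer_instance

-- ===== CLAIM (what is proved, stated in full; the proofs are below) =====
def Claim_equal_is_f_j : Prop := ∀ (cards : List Int), Dom_is_f_j cards → Pre_is_f_j cards → Spec_is_f_j cards (is_f_j cards)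

-- ===== LEMMAS AND PROOFS =====

theorem build_none_iff (all : List Int) : ∀ (rest three : List Int),
    pvA_buildThree all three rest = none ↔ ∃ c ∈ rest, all.count c = 3 ∧ c ∉ three ∧ 15 ≤ c := by
  intro rest
  induction rest with
  | nil => intro three; simp [pvA_buildThree]
  | cons c rest ih =>
    intro three
    by_cases h : all.count c = 3 ∧ c ∉ three
    · by_cases h15 : 15 ≤ c
      · simp only [pvA_buildThree, if_pos h, if_pos h15]
        constructor
        · intro _; exact ⟨c, by simp, h.1, h.2, h15⟩
        · intro _; trivial
      · simp only [pvA_buildThree, if_pos h, if_neg h15, ih]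
        constructor
        · rintro ⟨b, hb, hc3, hnb, hb15⟩
          exact ⟨b, by simp [hb], hc3, fun hm => hnb (List.mem_append_left _ hm), hb15⟩
        · rintro ⟨b, hb, hc3, hnb, hb15⟩
          rcases List.mem_cons.1 hb with rfl | hb'
          · omega
          · refine ⟨b, hb', hc3, fun hm => ?_, hb15⟩
            rcases List.mem_append.1 hm with h' | h'
            · exact hnb h'
            · simp at h'; omega
    · simp only [pvA_buildThree, if_neg h, ih]
      constructor
      · rintro ⟨b, hb, hc3, hnb, hb15⟩; exact ⟨b, by simp [hb], hc3, hnb, hb15⟩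
      · rintro ⟨b, hb, hc3, hnb, hb15⟩
        rcases List.mem_cons.1 hb with rfl | hb'
        · exact absurd ⟨hc3, hnb⟩ h
        · exact ⟨b, hb', hc3, hnb, hb15⟩

theorem build_some (all : List Int) : ∀ (rest three : List Int),
    (∀ c ∈ rest, all.count c = 3 → c ∉ three → c < 15) →
    pvA_buildThree all three rest
      = some (PySem.Set.update three (rest.filter (fun c => all.count c == 3))) := by
  intro rest
  induction rest with
  | nil => intro three _; simp [pvA_buildThree, PySem.Set.update]
  | cons c rest ih =>
    intro three hlt
    by_cases h3 : all.count c = 3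
    · by_cases hm : c ∈ three
      · have h : ¬ (all.count c = 3 ∧ c ∉ three) := by tauto
        rw [pvA_buildThree, if_neg h, ih three (fun b hb h3b hnb => hlt b (by simp [hb]) h3b hnb)]
        simp [h3, PySem.Set.update_cons, PySem.Set.add_of_mem hm]
      · have h : all.count c = 3 ∧ c ∉ three := ⟨h3, hm⟩
        have h15 : ¬ (15 ≤ c) := by
          have := hlt c (by simp) h3 hm; omega
        rw [pvA_buildThree, if_pos h, if_neg h15,
          ih (three ++ [c]) (fun b hb h3b hnb => hlt b (by simp [hb]) h3b (fun hmb => hnb (by simp [hmb])))]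
        simp [h3, PySem.Set.update_cons, PySem.Set.add_of_not_mem hm]
    · have h : ¬ (all.count c = 3 ∧ c ∉ three) := by tauto
      rw [pvA_buildThree, if_neg h, ih three (fun b hb h3b hnb => hlt b (by simp [hb]) h3b hnb)]
      simp [h3]

theorem removeAll_eq_filter (c : Int) (l : List Int) :
    pvA_removeAll c l = l.filter (fun x => !(x == c)) := by
  induction l with
  | nil => rfl
  | cons x xs ih =>
    by_cases h : x = c <;> simp [pvA_removeAll, ih, h]

theorem foldl_removeAll (S : List Int) : ∀ (l : List Int),
    S.foldl (fun acc c => pvA_removeAll c acc) l = l.filter (fun x => !(S.contains x)) := by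
  induction S with
  | nil => intro l; simp
  | cons c S ih =>
    intro l
    rw [List.foldl_cons, ih, removeAll_eq_filter, List.filter_filter]
    apply List.filter_congr
    intro x _
    by_cases h : x = c <;> by_cases h2 : S.contains x <;> simp_all

theorem wing_iff : ∀ (s : List Int), List.Pairwise (· ≤ ·) s →
    (pvA_wing s = true ↔ ∀ v : Int, s.count v % 2 = 0) := by
  intro s
  induction s using pvA_wing.induct with
  | case1 => simp [pvA_wing]
  | case2 a => 
    intro _
    simp only [pvA_wing]
    constructor
    · simp
    · intro h; have := h a; simp at this
  | case3 a rest ih =>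
    intro hp
    have hrest : List.Pairwise (· ≤ ·) rest := (List.pairwise_cons.1 (List.pairwise_cons.1 hp).2).2
    rw [show pvA_wing (a :: a :: rest) = pvA_wing rest from by simp [pvA_wing], ih hrest]
    constructor
    · intro h v
      have := h v
      by_cases hv : v = a <;> simp [List.count_cons, hv] at this ⊢ <;> omega
    · intro h v
      have := h v
      by_cases hv : v = a <;> simp [List.count_cons, hv] at this ⊢ <;> omega
  | case4 a b rest hne =>
    intro hp
    simp only [pvA_wing, if_neg hne]
    constructor
    · simp
    · intro h
      exfalso
      have hab : a ≤ b := (List.pairwise_cons.1 hp).1 b (by simp)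
      have hrest : ∀ x ∈ rest, b ≤ x := fun x hx => (List.pairwise_cons.1 (List.pairwise_cons.1 hp).2).1 x hx
      have hcount := h a
      have : a ∉ b :: rest := by
        intro hm
        rcases List.mem_cons.1 hm with rfl | hm'
        · exact hne rfl
        · have := hrest a hm'; omega
      rw [List.count_cons_self, List.count_eq_zero.2 this] at hcount
      omega

theorem consec_eq (t : List Int) :
    pvA_consec t = !((t.zip t.tail).any (fun p => !(p.2 - p.1 == 1))) := by
  rw [Bool.eq_iff_iff]
  unfold pvA_consec
  rw [List.all_eq_true, Bool.not_eq_eq_eq_not, Bool.not_true, List.any_eq_false]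
  constructor
  · intro h p hp
    rcases List.mem_iff_getElem.1 hp with ⟨i, hi, hpi⟩
    have hlen : i + 1 < t.length := by
      have := hi; simp [List.length_zip, List.length_tail] at this; omega
    have := h (i : Int) (by rw [PySem.List.mem_pyRange_one]; refine ⟨by positivity, by omega⟩)
    rw [PySem.List.pyGetD_eq_getElem t 0 (by positivity) (by omega)] at this
    rw [show ((i : Int) + 1) = ((i + 1 : Nat) : Int) by push_cast; ring] at this
    rw [PySem.List.pyGetD_eq_getElem t 0 (by positivity) (by omega)] at this
    simp only [Int.toNat_natCast] at this
    rw [← hpi]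
    simp only [List.getElem_zip, List.getElem_tail]
    simp at this ⊢
    omega
  · intro h i hi
    rw [PySem.List.mem_pyRange_one] at hi
    have hlen : i.toNat + 1 < t.length := by omega
    have hmem : (t[i.toNat], t[i.toNat + 1]) ∈ t.zip t.tail := by
      rw [List.mem_iff_getElem]
      refine ⟨i.toNat, by simp [List.length_zip, List.length_tail]; omega, ?_⟩
      simp [List.getElem_zip, List.getElem_tail]
    have := h _ hmem
    rw [PySem.List.pyGetD_eq_getElem t 0 (by omega) (by omega)]
    rw [show (i + 1) = ((i.toNat + 1 : Nat) : Int) by omega]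
    rw [PySem.List.pyGetD_eq_getElem t 0 (by positivity) (by omega)]
    simp only [Int.toNat_natCast]
    simp at this ⊢
    omega

theorem pv_mem_le_getLast (l : List Int) (hp : List.Pairwise (· ≤ ·) l) (h : l ≠ []) :
    ∀ x ∈ l, x ≤ l.getLast h := by
  induction l with
  | nil => simp at h
  | cons a t ih =>
    intro x hx
    rcases List.mem_cons.1 hx with rfl | hx'
    · rcases t.eq_nil_or_concat with rfl | _
      · simp [List.getLast]
      · have ht : t ≠ [] := by rintro rfl; simp_all
        rw [List.getLast_cons ht]
        exact le_trans ((List.pairwise_cons.1 hp).1 _ (List.getLast_mem ht)) le_rfl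
    · have ht : t ≠ [] := List.ne_nil_of_mem hx'
      rw [List.getLast_cons ht]
      exact ih (List.pairwise_cons.1 hp).2 ht x hx'

theorem pv_sorted_eq_of_nodup_mem (xs ys : List Int) (hx : xs.Nodup) (hy : ys.Nodup)
    (hmem : ∀ a, a ∈ xs ↔ a ∈ ys) :
    PySem.List.sorted xs (fun v => v) = PySem.List.sorted ys (fun v => v) := by
  apply PySem.List.sorted_eq_of_perm_of_pairwise_lt
  · exact (PySem.List.sorted_perm ys (fun v => v) false).trans
      ((List.perm_ext_iff_of_nodup hy hx).2 (fun a => (hmem a).symm))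
  · have h1 := PySem.List.sorted_pairwise ys (fun v => v)
    have h2 : (PySem.List.sorted ys (fun v => v)).Nodup :=
      (PySem.List.sorted_perm ys (fun v => v) false).nodup_iff.2 hy
    exact (h1.and h2).imp (fun {a b} hab => lt_of_le_of_ne hab.1 hab.2)

theorem pv_wing_eq (cards S : List Int)
    (hSmem : ∀ v, v ∈ S ↔ v ∈ cards ∧ cards.count v = 3) :
    pvA_wing (PySem.List.sorted (cards.filter (fun x => !(S.contains x))) (fun v => v))
      = ((PySem.Dict.counter cards).values.filter (fun k => !(k == 3))).all
          (fun k => PySem.Int.mod k 2 == 0) := by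
  rw [Bool.eq_iff_iff]
  rw [wing_iff _ (PySem.List.sorted_pairwise (cards.filter (fun x => !(S.contains x))) (fun v => v))]
  have hcnt : ∀ v : Int, (PySem.List.sorted (cards.filter (fun x => !(S.contains x))) (fun v => v)).count v
      = (cards.filter (fun x => !(S.contains x))).count v :=
    fun v => (PySem.List.sorted_perm _ _ false).count_eq v
  have hvals : (PySem.Dict.counter cards).values
      = (PySem.Set.ofList cards).map (fun k => ((cards.count k : Int))) := by
    simp [PySem.Dict.values, PySem.Dict.items_counter, List.map_map, Function.comp]
  rw [hvals, List.all_eq_true]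
  constructor
  · intro h k hk
    simp only [List.mem_filter, List.mem_map] at hk
    obtain ⟨⟨v, hv, rfl⟩, hne3⟩ := hk
    have hv3 : cards.count v ≠ 3 := by
      intro h3; apply absurd hne3; simp [h3]
    have hvS : v ∉ S := fun hm => hv3 ((hSmem v).1 hm).2
    have := h v
    rw [hcnt v, List.count_filter (by simp [hvS])] at this
    rw [PySem.Int.mod_eq_emod_of_pos (by omega : (0:Int) < 2)]
    simp only [beq_iff_eq]
    omega
  · intro h v
    rw [hcnt v]
    by_cases hvS : v ∈ S
    · have : v ∉ cards.filter (fun x => !(S.contains x)) := by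
        simp only [List.mem_filter, Bool.not_eq_eq_eq_not, Bool.not_true]
        rintro ⟨-, hc⟩
        simp [hvS] at hc
      rw [List.count_eq_zero.2 this]
    · rw [List.count_filter (by simp [hvS])]
      by_cases hvc : v ∈ cards
      · by_cases hv3 : cards.count v = 3
        · exact absurd ((hSmem v).2 ⟨hvc, hv3⟩) hvS
        · have := h ((cards.count v : Int)) (by
            simp only [List.mem_filter, List.mem_map]
            refine ⟨⟨v, by simp [PySem.Set.mem_ofList, hvc], rfl⟩, ?_⟩
            simp only [Bool.not_eq_eq_eq_not, Bool.not_true, beq_eq_false_iff_ne, ne_eq]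
            exact_mod_cast hv3)
          rw [PySem.Int.mod_eq_emod_of_pos (by omega : (0:Int) < 2)] at this
          simp only [beq_iff_eq] at this
          omega
      · rw [List.count_eq_zero.2 (fun hm => hvc hm)]

theorem pv_main (cards : List Int) : is_f_j cards = is_f_j_alt cards := by
  by_cases h10 : cards.length < 10
  · simp [is_f_j, is_f_j_alt, h10]
  by_cases h5 : cards.length % 5 = 0
  case neg => simp [is_f_j, is_f_j_alt, h10, h5]
  have hguard : ¬(cards.length < 10 ∨ cards.length % 5 ≠ 0) := by
    exact fun h => h.elim (fun a => h10 a) (fun b => b h5)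
  -- canonical descriptions of the two triple lists
  have hLmem : ∀ v : Int, v ∈ ((PySem.Set.ofList cards).filter (fun k => ((cards.count k : Int) == 3)))
      ↔ v ∈ cards ∧ cards.count v = 3 := by
    intro v
    simp only [List.mem_filter, PySem.Set.mem_ofList, beq_iff_eq]
    constructor
    · rintro ⟨h1, h2⟩; exact ⟨h1, by exact_mod_cast h2⟩
    · rintro ⟨h1, h2⟩; exact ⟨h1, by exact_mod_cast h2⟩
  have hTmem : ∀ v : Int, v ∈ PySem.Set.ofList (cards.filter (fun c => cards.count c == 3))
      ↔ v ∈ cards ∧ cards.count v = 3 := by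
    intro v; simp [PySem.Set.mem_ofList, List.mem_filter]
  have hitems : ((PySem.Dict.counter cards).items.filter (fun p => p.2 == 3)).map (fun p => p.1)
      = (PySem.Set.ofList cards).filter (fun k => ((cards.count k : Int) == 3)) := by
    rw [PySem.Dict.items_counter, List.filter_map, List.map_map]
    simp only [Function.comp_def]
    simp
  by_cases hbig : ∃ c ∈ cards, cards.count c = 3 ∧ 15 ≤ c
  · obtain ⟨c, hc, hc3, hc15⟩ := hbig
    have hA : pvA_buildThree cards [] cards = none :=
      (build_none_iff cards cards []).2 ⟨c, hc, hc3, by simp, hc15⟩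
    have hcL : c ∈ (PySem.Set.ofList cards).filter (fun k => ((cards.count k : Int) == 3)) :=
      (hLmem c).2 ⟨hc, hc3⟩
    have hne : PySem.List.sorted ((PySem.Set.ofList cards).filter (fun k => ((cards.count k : Int) == 3))) (fun v => v) ≠ [] := by
      rw [Ne, PySem.List.sorted_eq_nil_iff]
      exact List.ne_nil_of_mem hcL
    have h15 : 15 ≤ PySem.List.pyGetD (PySem.List.sorted ((PySem.Set.ofList cards).filter (fun k => ((cards.count k : Int) == 3))) (fun v => v)) (-1) 0 := by
      rw [PySem.List.pyGetD_neg_one _ _ hne]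
      exact le_trans hc15 (pv_mem_le_getLast _ (PySem.List.sorted_pairwise _ _) hne c
        ((PySem.List.mem_sorted _ _ _ _).2 hcL))
    simp only [is_f_j, is_f_j_alt, if_neg h10, if_neg (by omega : ¬(cards.length % 5 ≠ 0)), if_neg hguard, hA,
      PySem.Dict.foldl_insert_getD_add_one_eq_counter, hitems]
    simp [hne, h15]
  · have hlt : ∀ c ∈ cards, cards.count c = 3 → c ∉ ([] : List Int) → c < 15 := by
      intro c hc h3 _
      by_contra hcon
      exact hbig ⟨c, hc, h3, by omega⟩
    have hA : pvA_buildThree cards [] cards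
        = some (PySem.Set.ofList (cards.filter (fun c => cards.count c == 3))) := by
      rw [build_some cards cards [] hlt, PySem.Set.update_nil_left]
    have hST : PySem.List.sorted (PySem.Set.ofList (cards.filter (fun c => cards.count c == 3))) (fun v => v)
        = PySem.List.sorted ((PySem.Set.ofList cards).filter (fun k => ((cards.count k : Int) == 3))) (fun v => v) :=
      pv_sorted_eq_of_nodup_mem _ _ (PySem.Set.nodup_ofList _)
        ((PySem.Set.nodup_ofList cards).filter _)
        (fun a => (hTmem a).trans ((hLmem a).symm))
    by_cases hTnil : PySem.Set.ofList (cards.filter (fun c => cards.count c == 3)) = []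
    · have hLnil : (PySem.Set.ofList cards).filter (fun k => ((cards.count k : Int) == 3)) = [] := by
        rw [List.eq_nil_iff_forall_not_mem] at hTnil ⊢
        intro a ha
        exact hTnil a ((hTmem a).2 ((hLmem a).1 ha))
      simp only [is_f_j, is_f_j_alt, if_neg h10, if_neg (by omega : ¬(cards.length % 5 ≠ 0)), if_neg hguard, hA,
        PySem.Dict.foldl_insert_getD_add_one_eq_counter, hitems, hTnil, hLnil]
      rw [if_pos ((PySem.List.sorted_eq_nil_iff ([] : List Int) (fun v => v) false).2 rfl)]
      simp
    · have hLsne : PySem.List.sorted ((PySem.Set.ofList cards).filter (fun k => ((cards.count k : Int) == 3))) (fun v => v) ≠ [] := by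
        rw [← hST, Ne, PySem.List.sorted_eq_nil_iff]
        exact hTnil
      have hlast : ¬ (15 ≤ PySem.List.pyGetD (PySem.List.sorted ((PySem.Set.ofList cards).filter (fun k => ((cards.count k : Int) == 3))) (fun v => v)) (-1) 0) := by
        rw [PySem.List.pyGetD_neg_one _ _ hLsne]
        have hmem := List.getLast_mem hLsne
        rw [PySem.List.mem_sorted] at hmem
        have h1 := (hLmem _).1 hmem
        have h2 := hlt _ h1.1 h1.2 (by simp)
        omega
      have hSmem : ∀ v : Int, v ∈ PySem.List.sorted ((PySem.Set.ofList cards).filter (fun k => ((cards.count k : Int) == 3))) (fun v => v)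
          ↔ v ∈ cards ∧ cards.count v = 3 := by
        intro v
        rw [PySem.List.mem_sorted]
        exact hLmem v
      simp only [is_f_j, is_f_j_alt, if_neg h10, if_neg (by omega : ¬(cards.length % 5 ≠ 0)), if_neg hguard, hA,
        PySem.Dict.foldl_insert_getD_add_one_eq_counter, hitems, hST,
        if_neg (by simpa using hTnil), if_neg (by simpa using hLsne), if_neg hlast,
        consec_eq]
      by_cases hany : ((PySem.List.sorted ((PySem.Set.ofList cards).filter (fun k => ((cards.count k : Int) == 3))) (fun v => v)).zip
          (PySem.List.sorted ((PySem.Set.ofList cards).filter (fun k => ((cards.count k : Int) == 3))) (fun v => v)).tail).any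
            (fun p => !(p.2 - p.1 == 1)) = true
      · simp [hany]
      · rw [Bool.not_eq_true] at hany
        rw [if_neg (by rw [hany]; simp), if_neg (by rw [hany]; simp), foldl_removeAll]
        exact pv_wing_eq cards _ hSmem

-- ===== VERDICT (by name: the statement is the Claim_ definition above) =====
theorem is_f_j_spec : Claim_equal_is_f_j := by
  intro cards _ _
  exact pv_main cards
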